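-- pv_equiv track=rewrite | github.com/microsoft/FlexCAD | finetune.py | count_curve
-- ===== SOURCE A (Python) =====
-- def count_curve(loop):
--     c_line = find_all_curve_end_positions(loop, "line")
--     c_arc = find_all_curve_end_positions(loop, "arc")
--     c_circle = find_all_curve_end_positions(loop, 'circle')
--     dict_curve_type = {}
--     for c_i in c_line:
--         dict_curve_type[c_i] = '[line mask] '
--     for c_i in c_arc:
--         dict_curve_type[c_i] = '[arc mask] '
--     for c_i in c_circle:
--         dict_curve_type[c_i] = '[circle mask] '
--     list_curve = ''
--     c_all = c_line + c_arc + c_circle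
--     c_all.sort()
--     for c_i in c_all:
--         list_curve += (dict_curve_type[c_i])
--     return list_curve
--
-- def find_all_curve_end_positions(string,curve_end):
--     positions = []
--     start = 0
--     while True:
--         position = string.find(curve_end, start)
--         if position == -1:
--             break
--         positions.append(position)
--         start = position + len(curve_end)
--     return positions
-- ===== SOURCE B (Python) =====
-- def count_curve(loop):
--     masks = []
--     for i in range(len(loop)):
--         if loop.startswith('line', i):
--             masks.append('[line mask] ')
--         elif loop.startswith('arc', i):
--             masks.append('[arc mask] ')
--         elif loop.startswith('circle', i):
--             masks.append('[circle mask] ')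
--     return ''.join(masks)
-- ===== Notes on version B (the rewrite author's own statement) =====
-- stated objective: simpler
-- what changed: Replaced the three find-all scans plus position dict plus sort with one left-to-right scan that checks each index for 'line'/'arc'/'circle' and appends the mask immediately, so no positions, dict or sorting exist.
import Mathlib
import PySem

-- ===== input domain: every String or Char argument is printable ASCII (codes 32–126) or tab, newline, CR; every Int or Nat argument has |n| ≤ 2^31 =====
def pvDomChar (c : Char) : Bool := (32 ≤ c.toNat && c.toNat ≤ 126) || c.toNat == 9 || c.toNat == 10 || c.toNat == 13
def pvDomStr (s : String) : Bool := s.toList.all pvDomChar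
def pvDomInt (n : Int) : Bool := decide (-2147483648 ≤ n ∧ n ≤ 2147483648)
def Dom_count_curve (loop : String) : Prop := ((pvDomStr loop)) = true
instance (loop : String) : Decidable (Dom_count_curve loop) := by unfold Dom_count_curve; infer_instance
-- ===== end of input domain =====

-- B replaces A's three find-all scans + position dict + sort by one left-to-right scan that
-- appends each curve's mask the moment its keyword starts at the current index (objective: simpler).


-- ===== PORT A =====
-- helper find_all_curve_end_positions: the 'while True' loop is a fuel recursion; start strictly
-- increases each found step, so fuel = len(string)+1 never runs out on the nonempty keywords A uses.
def pvFindAllAux (s kw : List Char) (start : Nat) : Nat → List Int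
  | 0 => []
  | fuel + 1 =>
    let p := PySem.Chars.findFrom s kw (start : Int) none
    if p = -1 then []
    else p :: pvFindAllAux s kw (p.toNat + kw.length) fuel

def find_all_curve_end_positions (string curve_end : String) : List Int :=
  pvFindAllAux string.toList curve_end.toList 0 (string.toList.length + 1)

-- string values and concatenation are handled on the List Char side (PySem convention);
-- Python's dict_curve_type[c_i] cannot raise KeyError (every c_i is a dict key), so getD _ [] is exact.
def count_curve (loop : String) : String :=
  let c_line := find_all_curve_end_positions loop "line"
  let c_arc := find_all_curve_end_positions loop "arc"
  let c_circle := find_all_curve_end_positions loop "circle"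
  let d1 := c_line.foldl (fun d c => d.insert c "[line mask] ".toList) (PySem.Dict.empty : PySem.Dict Int (List Char))
  let d2 := c_arc.foldl (fun d c => d.insert c "[arc mask] ".toList) d1
  let d3 := c_circle.foldl (fun d c => d.insert c "[circle mask] ".toList) d2
  let c_all := PySem.List.sorted (c_line ++ c_arc ++ c_circle) (fun x => x) false
  String.ofList (c_all.foldl (fun acc c => acc ++ d3.getD c []) [])

-- ===== PORT B =====
-- loop.startswith(kw, i) with 0 ≤ i ≤ len(loop) is exactly: kw begins the i-th drop of loop.
def count_curve_alt (loop : String) : String :=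
  let s := loop.toList
  let masks := (List.range s.length).foldl (fun ms i =>
    if PySem.Chars.startswith (s.drop i) "line".toList then ms ++ ["[line mask] ".toList]
    else if PySem.Chars.startswith (s.drop i) "arc".toList then ms ++ ["[arc mask] ".toList]
    else if PySem.Chars.startswith (s.drop i) "circle".toList then ms ++ ["[circle mask] ".toList]
    else ms) []
  String.ofList masks.flatten   -- ''.join(masks)

-- ===== PRECONDITION & SPEC =====
def Spec_count_curve (loop : String) (out : String) : Prop := out = count_curve_alt loop
instance (loop : String) (out : String) : Decidable (Spec_count_curve loop out) := by unfold Spec_count_curve; infer_instance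

-- ===== CLAIM (what is proved, stated in full; the proofs are below) =====
def Claim_equal_count_curve : Prop := ∀ (loop : String), Dom_count_curve loop → Spec_count_curve loop (count_curve loop)

-- ===== LEMMAS AND PROOFS =====

-- the mask B emits at index i (and, as proved below, the dict value A stores for key i)
def pvMaskAt (s : List Char) (i : Nat) : List Char :=
  if PySem.Chars.startswith (s.drop i) "line".toList then "[line mask] ".toList
  else if PySem.Chars.startswith (s.drop i) "arc".toList then "[arc mask] ".toList
  else if PySem.Chars.startswith (s.drop i) "circle".toList then "[circle mask] ".toList
  else []

-- "kw occurs at index i of s", and the list of all occurrence indices, in order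
def pvP (kw : String) (s : List Char) (i : Nat) : Bool := kw.toList.isPrefixOf (s.drop i)
def pvOcc (kw : String) (s : List Char) : List Nat := (List.range s.length).filter (pvP kw s)

-- keyword kw has no nontrivial period: two occurrences cannot overlap
def pvNoOverlap (kw : List Char) : Prop := ∀ d, d < kw.length → 0 < d → ¬ kw.drop d <+: kw

lemma pv_no_close_occ {s kw : List Char} (hbf : pvNoOverlap kw) {r i : Nat}
    (h1 : kw <+: s.drop r) (h2 : kw <+: s.drop i) (hlt : r < i) (hclose : i < r + kw.length) :
    False := by
  have hd : s.drop i = (s.drop r).drop (i - r) := by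
    rw [List.drop_drop]; congr 1; omega
  have h1d : kw.drop (i - r) <+: (s.drop r).drop (i - r) := h1.drop _
  rw [← hd] at h1d
  have hcmp : kw.drop (i - r) <+: kw ∨ kw <+: kw.drop (i - r) :=
    List.prefix_or_prefix_of_prefix h1d h2
  have hlen : (kw.drop (i - r)).length < kw.length := by
    simp only [List.length_drop]; omega
  rcases hcmp with h | h
  · exact hbf (i - r) (by omega) (by omega) h
  · exact absurd h.length_le (by omega)

-- strictly increasing list: a filter whose first hit is r peels off as r :: (stricter filter)
lemma pv_filter_eq_cons {l : List Nat} (hl : l.Pairwise (· < ·)) {P Q : Nat → Bool} {r : Nat}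
    (hr : r ∈ l) (hPr : P r = true) (hlow : ∀ i, i < r → P i = false)
    (hQlow : ∀ i, i ≤ r → Q i = false) (hPQ : ∀ i, r < i → P i = Q i) :
    l.filter P = r :: l.filter Q := by
  induction l with
  | nil => cases hr
  | cons x xs ih =>
    have hx := List.pairwise_cons.mp hl
    rcases List.mem_cons.mp hr with h | hr'
    · subst h
      have hQx : Q r = false := hQlow r le_rfl
      have hfx : xs.filter P = xs.filter Q :=
        List.filter_congr (fun i hi => hPQ i (hx.1 i hi))
      simp [List.filter_cons, hPr, hQx, hfx]
    · have hxr : x < r := hx.1 r hr'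
      have hPx : P x = false := hlow x hxr
      have hQx : Q x = false := hQlow x (le_of_lt hxr)
      simp only [List.filter_cons, hPx, hQx, Bool.false_eq_true, if_false]
      exact ih hx.2 hr'

lemma pv_findAllAux_spec {s kw : List Char} (hkw : kw ≠ []) (hbf : pvNoOverlap kw) :
    ∀ fuel start, start ≤ s.length → s.length + 1 - start ≤ fuel →
    pvFindAllAux s kw start fuel =
      ((List.range s.length).filter
        (fun i => decide (start ≤ i) && kw.isPrefixOf (s.drop i))).map Int.ofNat := by
  intro fuel
  induction fuel with
  | zero => intro start hstart hfuel; exact absurd hstart (by omega)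
  | succ fuel ih =>
    intro start hstart hfuel
    have hkwpos : 0 < kw.length := List.length_pos_iff.mpr hkw
    simp only [pvFindAllAux]
    by_cases hneg : PySem.Chars.findFrom s kw (start : Int) none = -1
    · rw [if_pos hneg]
      have hno : ¬ kw <:+: s.drop start :=
        (PySem.Chars.findFrom_natCast_eq_neg_one_iff s kw start hstart).mp hneg
      have hz : (List.range s.length).filter
          (fun i => decide (start ≤ i) && kw.isPrefixOf (s.drop i)) = [] := by
        apply List.filter_eq_nil_iff.mpr
        intro i hi hPi
        simp only [Bool.and_eq_true, decide_eq_true_eq, List.isPrefixOf_iff_prefix] at hPi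
        apply hno
        have hd : s.drop i = (s.drop start).drop (i - start) := by
          rw [List.drop_drop]; congr 1; omega
        exact ((hd ▸ hPi.2).isInfix).trans (List.drop_suffix _ _).isInfix
      rw [hz, List.map_nil]
    · rw [if_neg hneg]
      obtain ⟨hge, hpref, hmin⟩ := PySem.Chars.findFrom_natCast_spec s kw start hstart hneg
      have hp0 : (0 : Int) ≤ PySem.Chars.findFrom s kw (start : Int) none :=
        le_trans (by exact_mod_cast Nat.zero_le start) hge
      set r := (PySem.Chars.findFrom s kw (start : Int) none).toNat with hrdef
      have hpr : PySem.Chars.findFrom s kw (start : Int) none = (r : Int) :=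
        (Int.toNat_of_nonneg hp0).symm
      have hstartr : start ≤ r := by
        have h := hge; rw [hpr] at h; exact_mod_cast h
      have hrlen : r + kw.length ≤ s.length := by
        have h := hpref.length_le
        simp only [List.length_drop] at h; omega
      have hrec := ih (r + kw.length) (by omega) (by omega)
      rw [hrec]
      have hcons :
          (List.range s.length).filter
            (fun i => decide (start ≤ i) && kw.isPrefixOf (s.drop i)) =
          r :: (List.range s.length).filter
            (fun i => decide (r + kw.length ≤ i) && kw.isPrefixOf (s.drop i)) := by
        apply pv_filter_eq_cons (List.pairwise_lt_range)
        · exact List.mem_range.mpr (by omega)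
        · simp only [Bool.and_eq_true, decide_eq_true_eq, List.isPrefixOf_iff_prefix]
          exact ⟨hstartr, hpref⟩
        · intro i hir
          by_cases his : start ≤ i
          · have hnp : kw.isPrefixOf (s.drop i) = false :=
              Bool.eq_false_iff.mpr (fun hc =>
                hmin i his hir (List.isPrefixOf_iff_prefix.mp hc))
            simp [hnp]
          · simp [his]
        · intro i hir
          have h1 : ¬ (r + kw.length ≤ i) := by omega
          simp [h1]
        · intro i hri
          by_cases hic : i < r + kw.length
          · have hnp : kw.isPrefixOf (s.drop i) = false :=
              Bool.eq_false_iff.mpr (fun hc =>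
                pv_no_close_occ hbf hpref (List.isPrefixOf_iff_prefix.mp hc) hri hic)
            simp [hnp]
          · have h1 : start ≤ i := by omega
            have h2 : r + kw.length ≤ i := by omega
            simp [h1, h2]
      rw [hcons]
      simp [hpr]

-- find_all_curve_end_positions lists exactly the occurrence indices, in increasing order
lemma pv_find_eq_occ (loop : String) (kw : String) (hne : kw.toList ≠ [])
    (hbf : pvNoOverlap kw.toList) :
    find_all_curve_end_positions loop kw = (pvOcc kw loop.toList).map Int.ofNat := by
  unfold find_all_curve_end_positions pvOcc
  rw [pv_findAllAux_spec hne hbf (loop.toList.length + 1) 0 (Nat.zero_le _) (by omega)]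
  all_goals exact congrArg _ (List.filter_congr (fun i _ => by simp [pvP, Bool.true_and]))

-- same, when the Nat indices are cast to Int keys as they are inserted
lemma pv_getD_foldl_insert_const' (ks : List Nat) (v : List Char)
    (d : PySem.Dict Int (List Char)) (i : Nat) :
    (ks.foldl (fun d c => d.insert (Int.ofNat c) v) d).getD (Int.ofNat i) [] =
      if i ∈ ks then v else d.getD (Int.ofNat i) [] := by
  induction ks generalizing d with
  | nil => simp
  | cons a as ih =>
    simp only [List.foldl_cons, ih, PySem.Dict.getD_insert, List.mem_cons]
    by_cases hk : i ∈ as <;> by_cases ha : i = a <;> simp [hk, ha]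

lemma pv_filter3_perm {l : List Nat} {p q r : Nat → Bool}
    (hpq : ∀ x, p x = true → q x = false) (hpr : ∀ x, p x = true → r x = false)
    (hqr : ∀ x, q x = true → r x = false) :
    (l.filter p ++ l.filter q ++ l.filter r).Perm (l.filter (fun x => p x || q x || r x)) := by
  induction l with
  | nil => simp
  | cons x xs ih =>
    by_cases hp : p x = true
    · simp only [List.filter_cons, hp, hpq x hp, hpr x hp, Bool.true_or, if_true,
        Bool.false_eq_true, if_false, List.cons_append]
      exact ih.cons x
    · have hp' : p x = false := by simpa using hp
      by_cases hq : q x = true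
      · simp only [List.filter_cons, hp', hq, hqr x hq, Bool.false_or, Bool.true_or, if_true,
          Bool.false_eq_true, if_false]
        have hmid : (xs.filter p ++ x :: xs.filter q ++ xs.filter r).Perm
            (x :: (xs.filter p ++ xs.filter q ++ xs.filter r)) := by
          have h := List.perm_middle (a := x) (l₁ := xs.filter p)
            (l₂ := xs.filter q ++ xs.filter r)
          simpa [List.append_assoc] using h
        exact hmid.trans (List.Perm.cons x ih)
      · have hq' : q x = false := by simpa using hq
        by_cases hr : r x = true
        · simp only [List.filter_cons, hp', hq', hr, Bool.false_or, Bool.or_true, if_true,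
            Bool.false_eq_true, if_false]
          exact List.Perm.trans List.perm_middle (List.Perm.cons x ih)
        · have hr' : r x = false := by simpa using hr
          simp only [List.filter_cons, hp', hq', hr', Bool.false_or,
            Bool.false_eq_true, if_false]
          exact ih

lemma pv_flatMap_filter {l : List Nat} {p : Nat → Bool} {f : Nat → List Char}
    (h : ∀ x ∈ l, p x = false → f x = []) :
    (l.filter p).flatMap f = l.flatMap f := by
  induction l with
  | nil => rfl
  | cons x xs ih =>
    have ih' := ih fun y hy => h y (List.mem_cons_of_mem _ hy)
    by_cases hp : p x = true
    · simp [List.filter_cons, hp, ih']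
    · have := h x List.mem_cons_self (by simpa using hp)
      simp [List.filter_cons, hp, this, ih']

-- two keywords neither of which is a prefix of the other never match at the same spot
lemma pv_not_pref {k1 k2 t : List Char} (h12 : ¬ k1 <+: k2) (h21 : ¬ k2 <+: k1)
    (h1 : k1 <+: t) : k2.isPrefixOf t = false :=
  Bool.eq_false_iff.mpr (fun hc => by
    rcases List.prefix_or_prefix_of_prefix (List.isPrefixOf_iff_prefix.mp hc) h1 with h | h
    · exact h21 h
    · exact h12 h)

lemma pv_sw (t kw : List Char) : PySem.Chars.startswith t kw = kw.isPrefixOf t := by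
  by_cases h : kw <+: t
  · rw [(PySem.Chars.startswith_iff t kw).mpr h, List.isPrefixOf_iff_prefix.mpr h]
  · rw [Bool.eq_false_iff.mpr (fun hc => h ((PySem.Chars.startswith_iff t kw).mp hc)),
        Bool.eq_false_iff.mpr (fun hc => h (List.isPrefixOf_iff_prefix.mp hc))]

-- foldl that appends f i equals foldl that appends g i when f = g on members
lemma pv_foldl_append_congr {l : List Nat} {f g : Nat → List Char}
    (h : ∀ i ∈ l, f i = g i) :
    ∀ acc, l.foldl (fun acc i => acc ++ f i) acc = l.foldl (fun acc i => acc ++ g i) acc := by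
  induction l with
  | nil => intro acc; rfl
  | cons x xs ih =>
    intro acc
    simp only [List.foldl_cons, h x List.mem_cons_self]
    exact ih (fun y hy => h y (List.mem_cons_of_mem _ hy)) _

-- B's accumulating fold, flattened, is flatMap of pvMaskAt
lemma pv_altFold_flatten (s : List Char) (l : List Nat) (ms : List (List Char)) :
    (l.foldl (fun ms i =>
      if PySem.Chars.startswith (s.drop i) "line".toList then ms ++ ["[line mask] ".toList]
      else if PySem.Chars.startswith (s.drop i) "arc".toList then ms ++ ["[arc mask] ".toList]
      else if PySem.Chars.startswith (s.drop i) "circle".toList then ms ++ ["[circle mask] ".toList]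
      else ms) ms).flatten = ms.flatten ++ l.flatMap (pvMaskAt s) := by
  induction l generalizing ms with
  | nil => simp
  | cons i l ih =>
    simp only [List.foldl_cons, List.flatMap_cons, ih]
    unfold pvMaskAt
    split_ifs <;> simp

-- the main assembly
lemma pv_main (loop : String) : count_curve loop = count_curve_alt loop := by
  have e_line := pv_find_eq_occ loop "line" (by decide) (by unfold pvNoOverlap; decide)
  have e_arc := pv_find_eq_occ loop "arc" (by decide) (by unfold pvNoOverlap; decide)
  have e_circle := pv_find_eq_occ loop "circle" (by decide) (by unfold pvNoOverlap; decide)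
  dsimp only [count_curve, count_curve_alt]
  rw [e_line, e_arc, e_circle, pv_altFold_flatten]
  apply congrArg String.ofList
  -- disjointness of the three matches at any index
  have hpq : ∀ x, pvP "line" loop.toList x = true → pvP "arc" loop.toList x = false :=
    fun x hx => pv_not_pref (by decide) (by decide) (List.isPrefixOf_iff_prefix.mp hx)
  have hpr : ∀ x, pvP "line" loop.toList x = true → pvP "circle" loop.toList x = false :=
    fun x hx => pv_not_pref (by decide) (by decide) (List.isPrefixOf_iff_prefix.mp hx)
  have hqr : ∀ x, pvP "arc" loop.toList x = true → pvP "circle" loop.toList x = false :=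
    fun x hx => pv_not_pref (by decide) (by decide) (List.isPrefixOf_iff_prefix.mp hx)
  -- the sorted merge of the three occurrence lists is the filter of the joint predicate
  have hsort : PySem.List.sorted
      ((pvOcc "line" loop.toList).map Int.ofNat ++
       (pvOcc "arc" loop.toList).map Int.ofNat ++
       (pvOcc "circle" loop.toList).map Int.ofNat) (fun x => x) false =
      ((List.range loop.toList.length).filter
        (fun i => pvP "line" loop.toList i || pvP "arc" loop.toList i ||
          pvP "circle" loop.toList i)).map Int.ofNat := by
    apply PySem.List.sorted_id_eq_of_perm_of_pairwise
    · have h := (pv_filter3_perm (l := List.range loop.toList.length) hpq hpr hqr).symm.map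
        Int.ofNat
      rw [List.map_append, List.map_append] at h
      exact h
    · exact (List.pairwise_lt_range.filter _).map Int.ofNat
        (fun a b hab => Int.ofNat_le.mpr (Nat.le_of_lt hab))
  rw [hsort]
  simp only [List.foldl_map]
  -- the dict lookup at an occurrence index is exactly B's mask at that index
  have hget : ∀ i : Nat,
      ((pvOcc "circle" loop.toList).foldl
        (fun d c => d.insert (Int.ofNat c) "[circle mask] ".toList)
        ((pvOcc "arc" loop.toList).foldl
          (fun d c => d.insert (Int.ofNat c) "[arc mask] ".toList)
          ((pvOcc "line" loop.toList).foldl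
            (fun d c => d.insert (Int.ofNat c) "[line mask] ".toList)
            (PySem.Dict.empty : PySem.Dict Int (List Char))))).getD (Int.ofNat i) [] =
      (if i ∈ pvOcc "circle" loop.toList then "[circle mask] ".toList
       else if i ∈ pvOcc "arc" loop.toList then "[arc mask] ".toList
       else if i ∈ pvOcc "line" loop.toList then "[line mask] ".toList
       else []) := by
    intro i
    rw [pv_getD_foldl_insert_const', pv_getD_foldl_insert_const', pv_getD_foldl_insert_const',
      PySem.Dict.getD_empty]
  have hmask : ∀ i ∈ (List.range loop.toList.length).filter
      (fun i => pvP "line" loop.toList i || pvP "arc" loop.toList i ||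
        pvP "circle" loop.toList i),
      ((pvOcc "circle" loop.toList).foldl
        (fun d c => d.insert (Int.ofNat c) "[circle mask] ".toList)
        ((pvOcc "arc" loop.toList).foldl
          (fun d c => d.insert (Int.ofNat c) "[arc mask] ".toList)
          ((pvOcc "line" loop.toList).foldl
            (fun d c => d.insert (Int.ofNat c) "[line mask] ".toList)
            (PySem.Dict.empty : PySem.Dict Int (List Char))))).getD (Int.ofNat i) [] =
      pvMaskAt loop.toList i := by
    intro i hi
    obtain ⟨hirange, hior⟩ := List.mem_filter.mp hi
    rw [hget]
    unfold pvMaskAt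
    simp only [pv_sw]
    by_cases hl : pvP "line" loop.toList i = true
    · have ha := hpq i hl
      have hc := hpr i hl
      have h1 : i ∉ pvOcc "circle" loop.toList := fun hm => by
        rw [(List.mem_filter.mp hm).2] at hc; cases hc
      have h2 : i ∉ pvOcc "arc" loop.toList := fun hm => by
        rw [(List.mem_filter.mp hm).2] at ha; cases ha
      have h3 : i ∈ pvOcc "line" loop.toList := List.mem_filter.mpr ⟨hirange, hl⟩
      have hl' := hl
      unfold pvP at hl'
      rw [if_neg h1, if_neg h2, if_pos h3, if_pos hl']
    · by_cases ha : pvP "arc" loop.toList i = true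
      · have hc := hqr i ha
        have h1 : i ∉ pvOcc "circle" loop.toList := fun hm => by
          rw [(List.mem_filter.mp hm).2] at hc; cases hc
        have h2 : i ∈ pvOcc "arc" loop.toList := List.mem_filter.mpr ⟨hirange, ha⟩
        have hl' : pvP "line" loop.toList i = false := by simpa using hl
        have ha' := ha
        unfold pvP at ha' hl'
        rw [if_neg h1, if_pos h2, if_neg (Bool.eq_false_iff.mp hl'), if_pos ha']
      · have hc : pvP "circle" loop.toList i = true := by
          rcases Bool.or_eq_true_iff.mp hior with h | h
          · rcases Bool.or_eq_true_iff.mp h with h' | h'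
            · exact absurd h' hl
            · exact absurd h' ha
          · exact h
        have h1 : i ∈ pvOcc "circle" loop.toList := List.mem_filter.mpr ⟨hirange, hc⟩
        have hl' : pvP "line" loop.toList i = false := by simpa using hl
        have ha' : pvP "arc" loop.toList i = false := by simpa using ha
        have hc' := hc
        unfold pvP at hc' hl' ha'
        rw [if_pos h1, if_neg (Bool.eq_false_iff.mp hl'), if_neg (Bool.eq_false_iff.mp ha'),
          if_pos hc']
  rw [pv_foldl_append_congr hmask []]
  rw [PySem.List.foldl_append_eq_flatMap]
  simp only [List.flatten_nil, List.nil_append]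
  apply pv_flatMap_filter
  intro x hx h0
  simp only [Bool.or_eq_false_iff] at h0
  unfold pvMaskAt
  simp only [pv_sw]
  have h1 := h0.1.1
  have h2 := h0.1.2
  have h3 := h0.2
  unfold pvP at h1 h2 h3
  rw [if_neg (Bool.eq_false_iff.mp h1), if_neg (Bool.eq_false_iff.mp h2),
    if_neg (Bool.eq_false_iff.mp h3)]

-- ===== VERDICT (by name: the statement is the Claim_ definition above) =====
theorem count_curve_spec : Claim_equal_count_curve := by
  intro loop _
  unfold Spec_count_curve
  exact pv_main loop
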